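-- pv_equiv track=rewrite | github.com/compilererrors/RazeCLI | razecli/backends/macos_ble_backend.py | _read_confidence_overall
-- ===== SOURCE A (Python) =====
-- from typing import Any, Dict, List, Optional, Sequence, Set, Tuple
--
-- def _read_confidence_overall(levels: Sequence[str]) -> str:
--     normalized = [str(level).strip().lower() for level in levels if str(level).strip()]
--     if not normalized:
--         return "unknown"
--     verified_count = sum(level == "verified" for level in normalized)
--     if verified_count == len(normalized):
--         return "verified"
--     if verified_count > 0:
--         return "mixed"
--     return "inferred"
-- ===== SOURCE B (Python) =====
-- def _read_confidence_overall(levels):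
--     # Map each entry to a local verdict, then fold the verdicts with a
--     # lattice join: "unknown" is the identity, "mixed" absorbs any two
--     # distinct non-unknown verdicts.
--     def verdict(level):
--         v = str(level).strip().lower()
--         if not v:
--             return "unknown"
--         return "verified" if v == "verified" else "inferred"
--
--     def join(x, y):
--         if x == "unknown":
--             return y
--         if y == "unknown" or x == y:
--             return x
--         return "mixed"
--
--     result = "unknown"
--     for level in levels:
--         result = join(result, verdict(level))
--     return result
-- ===== Notes on version B (the rewrite author's own statement) =====
-- stated objective: alternative
-- what changed: B maps each entry to a local verdict (unknown/verified/inferred) and folds the verdicts with an associative lattice join (unknown identity, mixed top), instead of A's two staged passes building a normalized list and counting 'verified' entries against its length.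
import Mathlib
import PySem

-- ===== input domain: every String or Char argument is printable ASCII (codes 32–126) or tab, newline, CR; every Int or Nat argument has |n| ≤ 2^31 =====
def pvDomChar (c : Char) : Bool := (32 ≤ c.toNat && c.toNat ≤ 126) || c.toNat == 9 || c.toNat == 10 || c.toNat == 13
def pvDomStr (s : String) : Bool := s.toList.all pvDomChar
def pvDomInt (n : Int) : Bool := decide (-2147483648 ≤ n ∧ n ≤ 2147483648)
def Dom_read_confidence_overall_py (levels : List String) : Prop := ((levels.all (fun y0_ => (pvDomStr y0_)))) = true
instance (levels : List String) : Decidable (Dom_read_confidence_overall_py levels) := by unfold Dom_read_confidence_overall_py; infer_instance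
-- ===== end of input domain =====

-- B maps each entry to a local verdict and folds the verdicts with an associative
-- lattice join (unknown identity, mixed top) instead of A's staged list-building
-- and counting (objective: alternative).

-- ===== PORT A =====
def read_confidence_overall_py (levels : List String) : String :=
  let normalized := (levels.filter (fun level => !(PySem.Str.strip level == ""))).map
      (fun level => PySem.Str.lower (PySem.Str.strip level))
  if normalized = [] then "unknown"
  else
    let verified_count : Int :=
      normalized.foldl (fun acc level => acc + (if level = "verified" then 1 else 0)) 0
    if verified_count = (normalized.length : Int) then "verified"
    else if verified_count > 0 then "mixed"
    else "inferred"

-- ===== PORT B =====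
def pvVerdict (level : String) : String :=
  let v := PySem.Str.lower (PySem.Str.strip level)
  if v = "" then "unknown"
  else if v = "verified" then "verified" else "inferred"

def pvJoin (x y : String) : String :=
  if x = "unknown" then y
  else if y = "unknown" ∨ x = y then x
  else "mixed"

def read_confidence_overall_py_alt (levels : List String) : String :=
  levels.foldl (fun result level => pvJoin result (pvVerdict level)) "unknown"

-- ===== PRECONDITION & SPEC =====
def Spec_read_confidence_overall_py (levels : List String) (out : String) : Prop := out = read_confidence_overall_py_alt levels
instance (levels : List String) (out : String) : Decidable (Spec_read_confidence_overall_py levels out) := by unfold Spec_read_confidence_overall_py; infer_instance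

-- ===== CLAIM (what is proved, stated in full; the proofs are below) =====
def Claim_equal_read_confidence_overall_py : Prop := ∀ (levels : List String), Dom_read_confidence_overall_py levels → Spec_read_confidence_overall_py levels (read_confidence_overall_py levels)

-- ===== LEMMAS AND PROOFS =====

theorem lower_eq_empty_iff (s : String) : PySem.Str.lower s = "" ↔ s = "" := by
  constructor
  · intro h
    have h' : (PySem.Str.lower s).toList = [] := by rw [h]; rfl
    rw [PySem.Str.toList_lower] at h'
    have : s.toList = [] := by
      cases hs : s.toList with
      | nil => rfl
      | cons a t => rw [hs] at h'; simp [PySem.Chars.lower] at h'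
    cases s; simp_all
  · intro h; subst h; rfl

-- the 4-element state encoded by (has verified, has inferred)
def pvEnc (sv si : Bool) : String :=
  if sv then (if si then "mixed" else "verified") else (if si then "inferred" else "unknown")

theorem join_enc (sv si : Bool) (v : String) (hv : v ≠ "") :
    pvJoin (pvEnc sv si) (if v = "verified" then "verified" else "inferred")
      = pvEnc (sv || (v == "verified")) (si || (v != "verified")) := by
  by_cases h : v = "verified" <;> cases sv <;> cases si <;>
    simp [pvJoin, pvEnc, h]

theorem join_enc_unknown (sv si : Bool) :
    pvJoin (pvEnc sv si) "unknown" = pvEnc sv si := by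
  cases sv <;> cases si <;> simp [pvJoin, pvEnc]

theorem fold_enc (levels : List String) (sv si : Bool) :
    levels.foldl (fun result level => pvJoin result (pvVerdict level)) (pvEnc sv si)
      = pvEnc
          (sv || ((levels.filter (fun level => !(PySem.Str.strip level == ""))).map
              (fun level => PySem.Str.lower (PySem.Str.strip level))).any (· == "verified"))
          (si || ((levels.filter (fun level => !(PySem.Str.strip level == ""))).map
              (fun level => PySem.Str.lower (PySem.Str.strip level))).any (· != "verified")) := by
  induction levels generalizing sv si with
  | nil => simp
  | cons a t ih =>
    simp only [List.foldl_cons]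
    by_cases h : PySem.Str.strip a = ""
    · have h2 : PySem.Str.lower (PySem.Str.strip a) = "" := (lower_eq_empty_iff _).2 h
      have hvd : pvVerdict a = "unknown" := by simp [pvVerdict, h2]
      rw [hvd, join_enc_unknown, ih]
      simp [List.filter_cons, h]
    · have h2 : PySem.Str.lower (PySem.Str.strip a) ≠ "" := by
        simpa [lower_eq_empty_iff] using h
      have hvd : pvVerdict a
          = (if PySem.Str.lower (PySem.Str.strip a) = "verified" then "verified" else "inferred") := by
        simp [pvVerdict, h2]
      rw [hvd, join_enc sv si _ h2, ih]
      have hp : (!(PySem.Str.strip a == "")) = true := by simp [h]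
      rw [List.filter_cons, hp]
      simp [Bool.or_assoc]

theorem foldl_count (N : List String) (c : Int) :
    N.foldl (fun acc level => acc + (if level = "verified" then 1 else 0)) c
      = c + (N.countP (fun l => l == "verified") : Int) := by
  induction N generalizing c with
  | nil => simp
  | cons a t ih =>
    simp only [List.foldl_cons, List.countP_cons, ih]
    by_cases h : a = "verified"
    · simp [h]; ring
    · simp [h]

theorem read_confidence_overall_py_spec : Claim_equal_read_confidence_overall_py := by
  intro levels _
  unfold Spec_read_confidence_overall_py read_confidence_overall_py read_confidence_overall_py_alt
  have hstart : ("unknown" : String) = pvEnc false false := rfl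
  rw [hstart, fold_enc]
  set N := ((levels.filter (fun level => !(PySem.Str.strip level == ""))).map
      (fun level => PySem.Str.lower (PySem.Str.strip level))) with hN
  by_cases hnil : N = []
  · simp [hnil, pvEnc]
  · rw [if_neg hnil, foldl_count]
    simp only [Bool.false_or, zero_add, gt_iff_lt]
    obtain ⟨y, hy⟩ := List.exists_mem_of_ne_nil N hnil
    have hcnt : ((N.countP (fun l => l == "verified") : Int) = (N.length : Int))
        ↔ ∀ x ∈ N, x = "verified" := by
      rw [Int.ofNat_inj, List.countP_eq_length]; simp
    by_cases hall : ∀ x ∈ N, x = "verified"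
    · have hV : N.any (· == "verified") = true := by
        simp only [List.any_eq_true]; exact ⟨y, hy, by simp [hall y hy]⟩
      have hI : N.any (· != "verified") = false := by
        simp only [List.any_eq_false]; intro x hx; simp [hall x hx]
      rw [if_pos (hcnt.2 hall), hV, hI]; rfl
    · rw [if_neg (by simpa [hcnt] using hall)]
      by_cases hmem : "verified" ∈ N
      · have hpos : (0 : Int) < (N.countP (fun l => l == "verified") : Int) := by
          have h1 : 0 < N.countP (fun l => l == "verified") := by
            rw [List.countP_pos_iff]; exact ⟨"verified", hmem, by simp⟩
          exact_mod_cast h1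
        have hV : N.any (· == "verified") = true := by
          simp only [List.any_eq_true]; exact ⟨"verified", hmem, by simp⟩
        obtain ⟨z, hz, hzne⟩ : ∃ x ∈ N, x ≠ "verified" := by
          by_contra hco; push_neg at hco; exact hall hco
        have hI : N.any (· != "verified") = true := by
          simp only [List.any_eq_true]; exact ⟨z, hz, by simp [hzne]⟩
        rw [if_pos hpos, hV, hI]; rfl
      · have hz : N.countP (fun l => l == "verified") = 0 := by
          rw [List.countP_eq_zero]
          intro x hx
          simp only [beq_iff_eq]
          intro h; exact hmem (h ▸ hx)
        have hV : N.any (· == "verified") = false := by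
          simp only [List.any_eq_false]; intro x hx
          simp only [beq_iff_eq]; intro h; exact hmem (h ▸ hx)
        have hI : N.any (· != "verified") = true := by
          simp only [List.any_eq_true]
          exact ⟨y, hy, by simp; intro h; exact hmem (h ▸ hy)⟩
        rw [if_neg (by simp [hz]), hV, hI]; rfl
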